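-- pv_equiv track=rewrite | github.com/mburke05/advent_of_code_2023 | day_3.py | get_full_integer
-- ===== SOURCE A (Python) =====
-- def get_full_integer(x, y, lines, visited):
--     """
--     this function will take the x,y coordinate of a found digit, and it will look
--     left and right to map the full integer value.
--     """
--     visited.add((x, y))
--
--     # first walk left
--     start_index = x
--     while start_index > 0 and lines[y][start_index - 1].isdigit():
--         visited.add((start_index - 1, y))
--         start_index -= 1
--
--     # then walk right
--     end_index = x
--     while end_index < len(lines[0]) - 1 and lines[y][end_index + 1].isdigit():
--         visited.add((end_index + 1, y))
--         end_index += 1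
--
--     return int("".join(lines[y][start_index : end_index + 1]))
-- ===== SOURCE B (Python) =====
-- _DIGITS = "0123456789"
--
--
-- def get_full_integer(x, y, lines, visited):
--     """
--     Slice-based: cut the row around x, strip the digit block off each side
--     to find the run boundaries, then convert the covered slice once.
--     """
--     row = lines[y]
--     s = len(row[:x].rstrip(_DIGITS))
--     right = row[x + 1:]
--     e = x + (len(right) - len(right.lstrip(_DIGITS)))
--     visited.update((c, y) for c in range(s, e + 1))
--     return int(row[s:e + 1])
-- ===== Notes on version B (the rewrite author's own statement) =====
-- stated objective: simpler
-- what changed: B finds the digit-run boundaries by slicing the row around x and stripping the digit block off each slice (rstrip/lstrip) instead of A's two index-walking while loops; Pre_ excludes the inputs where A raises (IndexError off a short row, ValueError on non-parsable slices), negative-x wraparound, and ragged rows whose digit run through x crosses len(lines[0])-1 of a longer row y, where A truncates at the first row's accidental bound and neither value is specified.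
-- outside the precondition, e.g. on get_full_integer(-1, 0, ['55'], set()): A returns 5, B returns 55; on get_full_integer(1, 1, ['ab', '1 2'], set()): A returns 1, B raises ValueError; on get_full_integer(0, 1, ['x', '23'], set()): A returns 2, B returns 23
import Mathlib
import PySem

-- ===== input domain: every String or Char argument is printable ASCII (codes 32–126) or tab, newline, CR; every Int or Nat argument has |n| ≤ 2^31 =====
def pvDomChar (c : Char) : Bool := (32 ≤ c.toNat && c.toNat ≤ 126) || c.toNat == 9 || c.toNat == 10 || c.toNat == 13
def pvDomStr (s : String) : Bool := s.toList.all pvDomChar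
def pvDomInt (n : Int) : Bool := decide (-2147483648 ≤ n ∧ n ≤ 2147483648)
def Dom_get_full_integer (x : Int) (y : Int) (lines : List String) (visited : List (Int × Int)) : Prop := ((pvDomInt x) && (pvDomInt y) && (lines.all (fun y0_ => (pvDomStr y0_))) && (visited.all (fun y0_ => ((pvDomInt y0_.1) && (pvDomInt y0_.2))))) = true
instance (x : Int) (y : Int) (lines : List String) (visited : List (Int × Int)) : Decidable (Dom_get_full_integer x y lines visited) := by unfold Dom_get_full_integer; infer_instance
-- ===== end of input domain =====

-- B finds the digit-run boundaries by slicing the row around x and stripping the digit block off each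
-- slice (rstrip/lstrip) instead of A's two index-walking while loops (simpler: no loops, three slices).
-- A mutates its `visited` set argument; the equivalence proved here is about the RETURN value.

-- ===== PORT A =====
-- A's two while loops, fuel-indexed: the fuel given at the call site bounds the iteration count exactly.
def pvWalkL (row : List Char) : Nat → Int → Int
  | 0, si => si
  | f+1, si =>
    if si > 0 ∧ PySem.Chars.isdigit (PySem.List.pyGetD row (si - 1) ' ') = true then
      pvWalkL row f (si - 1)
    else si

def pvWalkR (row : List Char) (L0 : Int) : Nat → Int → Int
  | 0, ei => ei
  | f+1, ei =>
    if ei < L0 - 1 ∧ PySem.Chars.isdigit (PySem.List.pyGetD row (ei + 1) ' ') = true then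
      pvWalkR row L0 f (ei + 1)
    else ei

def get_full_integer (x : Int) (y : Int) (lines : List String) (visited : List (Int × Int)) : Int :=
  let row := (PySem.List.pyGetD lines y "").toList
  let L0 : Int := ((PySem.List.pyGetD lines 0 "").toList.length : Int)
  let s := pvWalkL row x.toNat x
  let e := pvWalkR row L0 (L0 - 1 - x).toNat x
  (PySem.Int.ofChars? (PySem.List.slice row (some s) (some (e + 1)))).getD 0

-- ===== PORT B =====
-- Source B's _DIGITS constant
def pvDigits : List Char := ['0','1','2','3','4','5','6','7','8','9']

-- hand ports of Python str.rstrip(chars) / str.lstrip(chars) (PySem has only the two-sided stripChars):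
-- drop the trailing (resp. leading) characters that belong to `chars`; exact for every input.
def pvRstrip (cs : List Char) (chars : List Char) : List Char :=
  (cs.reverse.dropWhile (fun c => chars.contains c)).reverse

def pvLstrip (cs : List Char) (chars : List Char) : List Char :=
  cs.dropWhile (fun c => chars.contains c)

def get_full_integer_alt (x : Int) (y : Int) (lines : List String) (visited : List (Int × Int)) : Int :=
  let row := (PySem.List.pyGetD lines y "").toList
  let s : Int := ((pvRstrip (PySem.List.slice row none (some x)) pvDigits).length : Int)
  let right := PySem.List.slice row (some (x + 1)) none
  let e : Int := x + ((right.length : Int) - ((pvLstrip right pvDigits).length : Int))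
  (PySem.Int.ofChars? (PySem.List.slice row (some s) (some (e + 1)))).getD 0

-- ===== PRECONDITION & SPEC =====
-- Pre_ = the inputs the claim covers: y a valid row index, 0 ≤ x ≤ len(lines[y]) (a negative x is
-- resolved by accidental index wraparound, so it is excluded), A's walk does not run off the end of
-- a row y shorter than row 0 (IndexError), the digit run through x does not cross index
-- len(lines[0])-1 of a LONGER row y (this grid helper is written for the puzzle's rectangular
-- grids; on such ragged input A truncates the run at a bound taken from the first row while B reads
-- row y's whole run or raises ValueError — neither value is specified, so the corner is excluded),
-- and the assembled slice is int()-parsable: a digit at x, or exactly one '_' / sign / whitespace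
-- at x placed where int() accepts it relative to the adjacent digit runs (else A raises ValueError).
def Pre_get_full_integer (x : Int) (y : Int) (lines : List String) (visited : List (Int × Int)) : Prop :=
  let r := (PySem.List.pyGetD lines y "").toList
  let n : Int := (r.length : Int)
  let L : Int := ((PySem.List.pyGetD lines 0 "").toList.length : Int)
  let d1 : Prop := 1 ≤ x ∧ PySem.Chars.isdigit (r.getD (x - 1).toNat ' ') = true
  let d2 : Prop := x < L - 1 ∧ x + 1 < n ∧ PySem.Chars.isdigit (r.getD (x + 1).toNat ' ') = true
  let c := r.getD x.toNat ' '
  let cap := (max x (L - 1) + 1).toNat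
  PySem.Raise.InRange lines.length y ∧ 0 ≤ x ∧ x ≤ n ∧
  ¬ (n < L ∧ x < L - 1 ∧ ∀ m : Nat, m < r.length → x < (m : Int) →
        PySem.Chars.isdigit (r.getD m ' ') = true) ∧
  ¬ (((r.drop (x.toNat + 1)).take (cap - x.toNat)).all PySem.Chars.isdigit = true ∧
      cap < r.length) ∧
  (PySem.Chars.isdigit c = true ∨
   (c = '_' ∧ d1 ∧ d2) ∨
   ((c = '+' ∨ c = '-') ∧ ¬ d1 ∧ d2) ∨
   ((c = ' ' ∨ c = '\t' ∨ c = '\n' ∨ c = '\r') ∧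
     ((¬ d1 ∧ d2) ∨
      (d1 ∧ ¬ (x + 1 < n ∧ PySem.Chars.isdigit (r.getD (x + 1).toNat ' ') = true)))))

instance (x : Int) (y : Int) (lines : List String) (visited : List (Int × Int)) :
    Decidable (Pre_get_full_integer x y lines visited) := by
  unfold Pre_get_full_integer; infer_instance

def pvWitness_get_full_integer : Int × Int × List String × (List (Int × Int)) := (1, 0, ["a12"], [])

def Spec_get_full_integer (x : Int) (y : Int) (lines : List String) (visited : List (Int × Int)) (out : Int) : Prop := out = get_full_integer_alt x y lines visited
instance (x : Int) (y : Int) (lines : List String) (visited : List (Int × Int)) (out : Int) : Decidable (Spec_get_full_integer x y lines visited out) := by unfold Spec_get_full_integer; infer_instance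


-- ===== CLAIM (what is proved, stated in full; the proofs are below) =====
def Claim_equal_get_full_integer : Prop := ∀ (x : Int) (y : Int) (lines : List String) (visited : List (Int × Int)), Dom_get_full_integer x y lines visited → Pre_get_full_integer x y lines visited → Spec_get_full_integer x y lines visited (get_full_integer x y lines visited)

-- ===== LEMMAS AND PROOFS =====

-- `pvDg row m` = "Python sees a digit at index m of row" (an out-of-range read gives the nondigit default ' ').
def pvDg (row : List Char) (m : Nat) : Prop := PySem.Chars.isdigit (row.getD m ' ') = true

lemma pvDg_lt (row : List Char) (m : Nat) (h : pvDg row m) : m < row.length := by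
  by_contra hc
  rw [pvDg, List.getD_eq_default _ _ (by omega)] at h
  exact absurd h (by decide)

-- a digit run stated elementwise implies the drop/take segment form used by D_
lemma seg_all (r : List Char) (a b : Nat) (hb : b < r.length)
    (h : ∀ m, a < m → m ≤ b → pvDg r m) :
    ((r.drop (a+1)).take (b - a)).all PySem.Chars.isdigit = true := by
  rw [List.all_eq_true]
  intro c hc
  rw [List.mem_iff_getElem] at hc
  obtain ⟨i, hi, hceq⟩ := hc
  have hlen : i < b - a := by
    simp only [List.length_take, List.length_drop] at hi
    omega
  have hir : a + 1 + i < r.length := by omega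
  have hgi : ((r.drop (a+1)).take (b - a))[i] = r[a+1+i] := by
    rw [List.getElem_take, List.getElem_drop]
  have hd := h (a+1+i) (by omega) (by omega)
  rw [pvDg, List.getD_eq_getElem?_getD, List.getElem?_eq_getElem hir] at hd
  rw [← hceq, hgi]
  exact hd

lemma contains_digits (c : Char) : pvDigits.contains c = PySem.Chars.isdigit c := by
  rw [pvDigits, PySem.Chars.isdigit]
  simp only [List.contains_cons, List.contains_nil, Bool.or_false]
  rw [Bool.eq_iff_iff]
  simp only [Bool.or_eq_true, beq_iff_eq, Bool.and_eq_true, decide_eq_true_eq,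
    Char.ext_iff, UInt32.ext_iff, Char.le_def, UInt32.le_iff_toNat_le]
  have h0 : ('0':Char).val.toNat = 48 := by decide
  have h1 : ('1':Char).val.toNat = 49 := by decide
  have h2 : ('2':Char).val.toNat = 50 := by decide
  have h3 : ('3':Char).val.toNat = 51 := by decide
  have h4 : ('4':Char).val.toNat = 52 := by decide
  have h5 : ('5':Char).val.toNat = 53 := by decide
  have h6 : ('6':Char).val.toNat = 54 := by decide
  have h7 : ('7':Char).val.toNat = 55 := by decide
  have h8 : ('8':Char).val.toNat = 56 := by decide
  have h9 : ('9':Char).val.toNat = 57 := by decide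
  rw [h0, h1, h2, h3, h4, h5, h6, h7, h8, h9]
  omega

lemma contains_digits_fun : (fun c => pvDigits.contains c) = PySem.Chars.isdigit :=
  funext contains_digits

-- takeWhile facts, phrased with getD so they compose with pvDg
lemma tw_le (p : Char → Bool) (l : List Char) : (l.takeWhile p).length ≤ l.length :=
  (List.takeWhile_prefix p).length_le

lemma tw_get (p : Char → Bool) (l : List Char) (i : Nat) (h : i < (l.takeWhile p).length) :
    p (l.getD i ' ') = true := by
  have hil : i < l.length := lt_of_lt_of_le h (tw_le p l)
  have hpref := List.takeWhile_prefix (l := l) (p := p)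
  have hget : (l.takeWhile p)[i] = l[i] := hpref.getElem h
  have hmem : (l.takeWhile p)[i] ∈ l.takeWhile p := List.getElem_mem h
  have := List.mem_takeWhile_imp hmem
  rw [List.getD_eq_getElem?_getD, List.getElem?_eq_getElem hil]
  simpa [hget] using this

lemma getD_append_head (as bs : List Char) (hne : bs ≠ []) :
    (as ++ bs).getD as.length ' ' = bs.head hne := by
  rw [List.getD_eq_getElem?_getD, List.getElem?_append_right (le_refl _), Nat.sub_self]
  simp [List.length_pos_iff.mpr hne, List.getElem_zero_eq_head]

lemma tw_stop (p : Char → Bool) (l : List Char) (h : (l.takeWhile p).length < l.length) :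
    ¬ p (l.getD (l.takeWhile p).length ' ') = true := by
  have hsplit := List.takeWhile_append_dropWhile (p := p) (l := l)
  have hne : l.dropWhile p ≠ [] := by
    intro hc
    rw [hc, List.append_nil] at hsplit
    rw [hsplit] at h
    omega
  have hget := getD_append_head (l.takeWhile p) (l.dropWhile p) hne
  rw [hsplit] at hget
  rw [hget]
  simpa using List.head_dropWhile_not p hne

-- the left walk of A: fuel f ≥ s iterations suffice
lemma pvWalkL_spec (row : List Char) : ∀ (f s : Nat), s ≤ f →
    ∃ s' : Nat, pvWalkL row f (s : Int) = (s' : Int) ∧ s' ≤ s ∧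
      (∀ m, s' ≤ m → m < s → pvDg row m) ∧ (s' = 0 ∨ ¬ pvDg row (s' - 1)) := by
  intro f
  induction f with
  | zero =>
      intro s hs
      have : s = 0 := by omega
      subst this
      exact ⟨0, rfl, le_refl 0, by omega, Or.inl rfl⟩
  | succ f ih =>
      intro s hs
      match s with
      | 0 =>
          refine ⟨0, ?_, le_refl 0, by omega, Or.inl rfl⟩
          rw [pvWalkL, if_neg (by rintro ⟨h0, -⟩; omega)]
      | k+1 =>
          rw [pvWalkL]
          have hidx : ((((k:Nat)+1 : Nat)) : Int) - 1 = ((k : Nat) : Int) := by push_cast; ring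
          by_cases hd : pvDg row k
          · rw [if_pos (by
              refine ⟨by positivity, ?_⟩
              rw [hidx]
              simpa [pvDg, PySem.List.pyGetD_natCast] using hd)]
            rw [hidx]
            obtain ⟨s', h1, h2, h3, h4⟩ := ih k (by omega)
            refine ⟨s', h1, by omega, ?_, h4⟩
            intro m hm1 hm2
            rcases Nat.lt_or_ge m k with h | h
            · exact h3 m hm1 h
            · have : m = k := by omega
              subst this; exact hd
          · rw [if_neg (by
              rintro ⟨-, hdig⟩
              rw [hidx] at hdig
              exact hd (by simpa [pvDg, PySem.List.pyGetD_natCast] using hdig))]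
            exact ⟨k+1, rfl, le_refl _, by omega, Or.inr (by simpa using hd)⟩

-- the right walk of A with bound n = len(lines[0]): fuel n-1-e iterations suffice
lemma pvWalkR_spec (row : List Char) (n : Nat) (hn : 1 ≤ n) :
    ∀ (f e : Nat), n - 1 - e ≤ f → e ≤ n - 1 →
    ∃ e' : Nat, pvWalkR row (n : Int) f (e : Int) = (e' : Int) ∧ e ≤ e' ∧ e' ≤ n - 1 ∧
      (∀ m, e < m → m ≤ e' → pvDg row m) ∧ (e' = n - 1 ∨ ¬ pvDg row (e' + 1)) := by
  intro f
  induction f with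
  | zero =>
      intro e hf he
      have : e = n - 1 := by omega
      exact ⟨e, rfl, le_refl e, by omega, by omega, Or.inl this⟩
  | succ f ih =>
      intro e hf he
      rw [pvWalkR]
      have hidx : ((e : Nat) : Int) + 1 = (((e+1 : Nat)) : Int) := by push_cast; ring
      by_cases hend : e < n - 1
      · by_cases hd : pvDg row (e+1)
        · rw [if_pos (by
            constructor
            · omega
            · rw [hidx, PySem.List.pyGetD_natCast]
              exact hd)]
          rw [hidx]
          obtain ⟨e', h1, h2, h3, h4, h5⟩ := ih (e+1) (by omega) (by omega)
          refine ⟨e', h1, by omega, h3, ?_, h5⟩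
          intro m hm1 hm2
          rcases Nat.lt_or_ge (e+1) m with h | h
          · exact h4 m h hm2
          · have : m = e+1 := by omega
            subst this; exact hd
        · rw [if_neg (by
            rintro ⟨-, hdig⟩
            rw [hidx, PySem.List.pyGetD_natCast] at hdig
            exact hd hdig)]
          exact ⟨e, rfl, le_refl e, he, by omega, Or.inr hd⟩
      · rw [if_neg (by rintro ⟨hlt, -⟩; omega)]
        exact ⟨e, rfl, le_refl e, he, by omega, Or.inl (by omega)⟩

-- the left boundary is determined by its two properties
lemma left_unique (row : List Char) (X a b : Nat)
    (ha1 : a ≤ X) (ha2 : ∀ m, a ≤ m → m < X → pvDg row m) (ha3 : a = 0 ∨ ¬ pvDg row (a - 1))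
    (hb1 : b ≤ X) (hb2 : ∀ m, b ≤ m → m < X → pvDg row m) (hb3 : b = 0 ∨ ¬ pvDg row (b - 1)) :
    a = b := by
  by_contra hne
  rcases Nat.lt_or_ge a b with h | h
  · rcases hb3 with h0 | h0
    · omega
    · exact h0 (ha2 (b-1) (by omega) (by omega))
  · have h' : b < a := by omega
    rcases ha3 with h0 | h0
    · omega
    · exact h0 (hb2 (a-1) (by omega) (by omega))

-- an uncapped right boundary is determined by the run and its stop
lemma run_unique (row : List Char) (X a b : Nat)
    (ha1 : X ≤ a) (ha2 : ∀ m, X < m → m ≤ a → pvDg row m) (ha3 : ¬ pvDg row (a + 1))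
    (hb1 : X ≤ b) (hb2 : ∀ m, X < m → m ≤ b → pvDg row m) (hb3 : ¬ pvDg row (b + 1)) :
    a = b := by
  by_contra hne
  rcases Nat.lt_or_ge a b with h | h
  · exact ha3 (hb2 (a+1) (by omega) (by omega))
  · exact hb3 (ha2 (b+1) (by omega) (by omega))

-- characterization of B's rstrip boundary on a prefix of the row
lemma rstrip_spec (l : List Char) :
    (pvRstrip l pvDigits).length ≤ l.length ∧
    (∀ m, (pvRstrip l pvDigits).length ≤ m → m < l.length → pvDg l m) ∧
    ((pvRstrip l pvDigits).length = 0 ∨ ¬ pvDg l ((pvRstrip l pvDigits).length - 1)) := by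
  rw [pvRstrip, contains_digits_fun]
  obtain ⟨T, hT⟩ : ∃ T, (l.reverse.takeWhile PySem.Chars.isdigit).length = T := ⟨_, rfl⟩
  have hTle : T ≤ l.length := by
    rw [← hT]
    simpa using tw_le PySem.Chars.isdigit l.reverse
  have hlen : ((l.reverse.dropWhile PySem.Chars.isdigit).reverse).length = l.length - T := by
    have hs := congrArg List.length
      (List.takeWhile_append_dropWhile (p := PySem.Chars.isdigit) (l := l.reverse))
    simp only [List.length_append, List.length_reverse] at hs ⊢
    omega
  have hrev : ∀ m, m < l.length → l.reverse.getD (l.length - 1 - m) ' ' = l.getD m ' ' := by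
    intro m hm
    rw [List.getD_eq_getElem?_getD, List.getD_eq_getElem?_getD,
      List.getElem?_eq_getElem (by rw [List.length_reverse]; omega),
      List.getElem?_eq_getElem hm]
    simp only [List.getElem_reverse, Option.getD_some]
    congr 2
    omega
  rw [hlen]
  refine ⟨by omega, ?_, ?_⟩
  · intro m hm1 hm2
    rw [pvDg, ← hrev m hm2]
    exact tw_get PySem.Chars.isdigit l.reverse (l.length - 1 - m) (by rw [hT]; omega)
  · by_cases h0 : l.length - T = 0
    · exact Or.inl h0
    · refine Or.inr ?_
      have hTlt : T < l.length := by omega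
      have hstop := tw_stop PySem.Chars.isdigit l.reverse
        (by rw [hT, List.length_reverse]; omega)
      rw [hT] at hstop
      rw [pvDg, ← hrev (l.length - T - 1) (by omega)]
      have heq : l.length - 1 - (l.length - T - 1) = T := by omega
      rw [heq]
      exact hstop

-- characterization of B's lstrip count on the slice right of x
lemma lstrip_spec (l : List Char) :
    (l.takeWhile PySem.Chars.isdigit).length = l.length - (pvLstrip l pvDigits).length ∧
    (pvLstrip l pvDigits).length ≤ l.length ∧
    (∀ i, i < (l.takeWhile PySem.Chars.isdigit).length → pvDg l i) ∧
    ((l.takeWhile PySem.Chars.isdigit).length < l.length →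
      ¬ pvDg l (l.takeWhile PySem.Chars.isdigit).length) := by
  rw [pvLstrip, contains_digits_fun]
  set p := PySem.Chars.isdigit with hp
  have hsplit := List.takeWhile_append_dropWhile (p := p) (l := l)
  have hl := congrArg List.length hsplit
  simp only [List.length_append] at hl
  refine ⟨by omega, by omega, ?_, ?_⟩
  · intro i hi
    exact tw_get p l i hi
  · intro h
    exact tw_stop p l h

-- ===== VERDICT (by name: the statements are the Claim_ definitions above) =====
theorem get_full_integer_spec : Claim_equal_get_full_integer := by
  intro x y lines visited _ hpre
  unfold Spec_get_full_integer
  obtain ⟨hy, hx0, hxle, -, hncross, -⟩ := hpre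
  unfold get_full_integer get_full_integer_alt
  dsimp only
  set row := (PySem.List.pyGetD lines y "").toList with hrow
  set n := row.length with hn
  set L := (PySem.List.pyGetD lines 0 "").toList.length with hL
  obtain ⟨X, rfl⟩ : ∃ X : Nat, x = (X : Int) := ⟨x.toNat, (Int.toNat_of_nonneg hx0).symm⟩
  have hXle : X ≤ n := by exact_mod_cast hxle
  -- the left boundary: A's left walk equals B's rstrip length on row[:x]
  obtain ⟨s', hLw, hs1, hs2, hs3⟩ := pvWalkL_spec row X X (le_refl X)
  have hsliceL : PySem.List.slice row none (some (X : Int)) = row.take X :=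
    PySem.List.slice_to_natCast row X
  have htake : ∀ m, m < X → (row.take X).getD m ' ' = row.getD m ' ' := by
    intro m hm
    rw [List.getD_eq_getElem?_getD, List.getD_eq_getElem?_getD,
      List.getElem?_take_of_lt hm]
  have hltake : (row.take X).length = X := by rw [List.length_take]; omega
  obtain ⟨hr1, hr2, hr3⟩ := rstrip_spec (row.take X)
  rw [hltake] at hr1 hr2
  set sB := (pvRstrip (row.take X) pvDigits).length with hsB
  have hsBeq : sB = s' := by
    apply left_unique row X sB s' hr1 _ _ hs1 hs2 hs3
    · intro m hm1 hm2
      have := hr2 m hm1 hm2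
      rwa [pvDg, htake m hm2] at this
    · by_cases h0 : sB = 0
      · exact Or.inl h0
      · rcases hr3 with h | h
        · exact Or.inl h
        · refine Or.inr ?_
          rwa [pvDg, htake (sB - 1) (by omega)] at h
  -- the right boundary: B's uncapped digit run after x
  have hsliceR : PySem.List.slice row (some ((X : Int) + 1)) none = row.drop (X+1) := by
    rw [show ((X : Int) + 1) = (((X+1 : Nat)) : Int) by push_cast; ring]
    rw [PySem.List.slice_from_natCast]
  set right := row.drop (X+1) with hright
  have hrlen : right.length = n - (X+1) := by rw [hright, List.length_drop]
  have hrget : ∀ i, right.getD i ' ' = row.getD (X+1+i) ' ' := by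
    intro i
    rw [List.getD_eq_getElem?_getD, List.getD_eq_getElem?_getD, hright, List.getElem?_drop]
  obtain ⟨hk0, hk1, hk2, hk3⟩ := lstrip_spec right
  set k := (right.takeWhile PySem.Chars.isdigit).length with hk
  have hkle : k ≤ right.length := le_trans (le_of_eq hk0) (by omega)
  have hkdig : ∀ m, X < m → m ≤ X + k → pvDg row m := by
    intro m hm1 hm2
    have hi : m - (X+1) < k := by omega
    have := hk2 (m - (X+1)) hi
    rw [pvDg, hrget (m - (X+1))] at this
    have hmx : X + 1 + (m - (X+1)) = m := by omega
    rwa [hmx] at this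
  have hkstop : ¬ pvDg row (X + k + 1) := by
    by_cases hkr : k < right.length
    · have := hk3 hkr
      rw [pvDg, hrget k] at this
      have hmx : X + 1 + k = X + k + 1 := by omega
      rwa [hmx] at this
    · intro hc
      have := pvDg_lt row (X + k + 1) hc
      omega
  have hEB : ((right.length : Int) - ((pvLstrip right pvDigits).length : Int)) = (k : Int) := by
    omega
  by_cases hcase : ((X : Nat) : Int) < ((L : Nat) : Int) - 1
  · -- A's right walk runs with the bound L still ahead
    have hl1 : 1 ≤ L := by omega
    have hfuel : (((L : Nat) : Int) - 1 - ((X : Nat) : Int)).toNat = L - 1 - X := by omega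
    obtain ⟨e', hRw, he1, he2, he3, he4⟩ :=
      pvWalkR_spec row L hl1 (L - 1 - X) X (le_refl _) (by omega)
    have hestop : ¬ pvDg row (e' + 1) := by
      rcases he4 with heL | h
      · intro hdg2
        have he1L : e' + 1 = L := by omega
        apply hncross
        have hmax : max ((X : Nat) : Int) (((L : Nat) : Int) - 1) = ((L : Nat) : Int) - 1 := by
          omega
        rw [hmax]
        have htn : (((L : Nat) : Int) - 1 + 1).toNat = L := by omega
        rw [htn, show (((X : Nat) : Int).toNat) = X from rfl]
        have hLn : L < n := by
          have := pvDg_lt row (e' + 1) hdg2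
          omega
        refine ⟨?_, by omega⟩
        apply seg_all row X L (by omega)
        intro m hm1 hm2
        rcases Nat.lt_or_ge m L with hm | hm
        · exact he3 m hm1 (by omega)
        · have : m = L := by omega
          subst this
          rw [← he1L]
          exact hdg2
      · exact h
    have hee : e' = X + k :=
      run_unique row X e' (X + k) he1 he3 hestop (by omega) hkdig hkstop
    rw [show (((X : Nat) : Int).toNat) = X from rfl, hLw, hfuel, hRw, hsliceL, hsliceR,
      hEB, ← hsB, hsBeq, hee]
    congr 2
  · -- the bound from row 0 is already reached at x: A does not walk right, and ¬D_ forces k = 0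
    have hfuel : (((L : Nat) : Int) - 1 - ((X : Nat) : Int)).toNat = 0 := by omega
    have hkz : k = 0 := by
      by_contra hk1'
      have hdg1 : pvDg row (X + 1) := hkdig (X + 1) (by omega) (by omega)
      apply hncross
      have hmax : max ((X : Nat) : Int) (((L : Nat) : Int) - 1) = ((X : Nat) : Int) := by omega
      rw [hmax]
      have htn : (((X : Nat) : Int) + 1).toNat = X + 1 := by omega
      rw [htn, show (((X : Nat) : Int).toNat) = X from rfl]
      have hXn : X + 1 < n := pvDg_lt row (X + 1) hdg1
      refine ⟨?_, by omega⟩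
      apply seg_all row X (X + 1) (by omega)
      intro m hm1 hm2
      have : m = X + 1 := by omega
      subst this
      exact hdg1
    rw [show (((X : Nat) : Int).toNat) = X from rfl, hLw, hfuel, hsliceL, hsliceR,
      hEB, ← hsB, hsBeq, hkz,
      show pvWalkR row ((L : Nat) : Int) 0 ((X : Nat) : Int) = ((X : Nat) : Int) from rfl]
    congr 2
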